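-- pv_equiv track=rewrite | github.com/Caya91/studienarbeit | misc/gf_4.py | gf4_mul
-- ===== SOURCE A (Python) =====
-- RED_POLY = 0b11  # corresponds to x + 1 when reducing x^2
--
-- def gf4_mul(a, b):
--     """Multiplication in GF(2^2) with modulus x^2 + x + 1."""
--     """TODO: warning when arguments are out of field range"""
--     a &= 0b11
--     b &= 0b11
--     res = 0
--     for _ in range(2):  # degree 2 => 2 bits
--         if b & 1:
--             res ^= a
--         b >>= 1
--         # shift a and reduce if x^2 term appears
--         carry = (a & 0b10) >> 1  # highest bit before shift
--         a = (a << 1) & 0b11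
--         if carry:
--             a ^= RED_POLY
--     return res & 0b11
-- ===== SOURCE B (Python) =====
-- # GF(4) multiplication by a precomputed 4x4 table: no loop, no shift-and-reduce.
-- MUL = [
--     [0, 0, 0, 0],
--     [0, 1, 2, 3],
--     [0, 2, 3, 1],
--     [0, 3, 1, 2],
-- ]
--
-- def gf4_mul(a, b):
--     return MUL[a & 0b11][b & 0b11]
-- ===== Notes on version B (the rewrite author's own statement) =====
-- stated objective: simpler
-- what changed: Replaces the 2-iteration shift-and-reduce carry-less multiplication loop with a hardcoded 4x4 GF(4) multiplication table indexed by the two masked arguments.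
import Mathlib
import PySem

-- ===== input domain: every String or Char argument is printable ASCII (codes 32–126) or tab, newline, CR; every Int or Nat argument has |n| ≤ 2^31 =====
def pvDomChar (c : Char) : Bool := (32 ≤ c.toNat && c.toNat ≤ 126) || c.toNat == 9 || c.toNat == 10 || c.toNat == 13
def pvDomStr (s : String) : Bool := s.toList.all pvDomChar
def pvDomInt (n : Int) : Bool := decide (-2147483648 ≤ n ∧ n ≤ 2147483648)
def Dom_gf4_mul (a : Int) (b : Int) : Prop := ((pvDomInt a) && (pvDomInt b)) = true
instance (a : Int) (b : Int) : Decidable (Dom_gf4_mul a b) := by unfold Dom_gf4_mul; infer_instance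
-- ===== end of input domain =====

-- B replaces A's 2-step shift-and-reduce loop with a hardcoded 4x4 GF(4) multiplication table (simpler).


-- ===== PORT A =====
-- literal transliteration of A: mask both arguments, then the 2-iteration
-- shift-and-reduce loop (state = (res, a, b)), then the final mask.
def gf4_mul (a : Int) (b : Int) : Int :=
  let a0 := PySem.Int.band a 3
  let b0 := PySem.Int.band b 3
  let s := (PySem.List.pyRange 0 2 1).foldl
    (fun (s : Int × Int × Int) _ =>
      let res := if PySem.Int.band s.2.2 1 ≠ 0 then PySem.Int.bxor s.1 s.2.1 else s.1
      let b' := s.2.2 >>> (1 : Nat)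
      let carry := (PySem.Int.band s.2.1 2) >>> (1 : Nat)
      let a' := PySem.Int.band (s.2.1 <<< (1 : Nat)) 3
      let a'' := if carry ≠ 0 then PySem.Int.bxor a' 3 else a'  -- RED_POLY = 0b11
      (res, a'', b')) (0, a0, b0)
  PySem.Int.band s.1 3

-- ===== PORT B =====
def pvMUL : List (List Int) :=
  [[0, 0, 0, 0],
   [0, 1, 2, 3],
   [0, 2, 3, 1],
   [0, 3, 1, 2]]

def gf4_mul_alt (a : Int) (b : Int) : Int :=
  PySem.List.pyGetD (PySem.List.pyGetD pvMUL (PySem.Int.band a 3) []) (PySem.Int.band b 3) 0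

-- ===== PRECONDITION & SPEC =====
def Spec_gf4_mul (a : Int) (b : Int) (out : Int) : Prop := out = gf4_mul_alt a b
instance (a : Int) (b : Int) (out : Int) : Decidable (Spec_gf4_mul a b out) := by unfold Spec_gf4_mul; infer_instance

-- ===== CLAIM (what is proved, stated in full; the proofs are below) =====
def Claim_equal_gf4_mul : Prop := ∀ (a : Int) (b : Int), Dom_gf4_mul a b → Spec_gf4_mul a b (gf4_mul a b)

-- ===== LEMMAS AND PROOFS =====
-- Python's `x & 0b11` is `x % 4` (floor modulus), also for negative x.
theorem pv_band3_eq_emod (a : Int) : PySem.Int.band a 3 = a % 4 := by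
  have key : ∀ n : Nat, n &&& 3 = n % 4 := fun n => Nat.and_two_pow_sub_one_eq_mod n 2
  unfold PySem.Int.band
  split
  · split
    · rw [show Int.toNat 3 = 3 from rfl, key]; omega
    · omega
  · split
    · rw [show Int.toNat 3 = 3 from rfl, Nat.land_comm, key]; omega
    · omega

-- ===== VERDICT (by name: the statement is the Claim_ definition above) =====
theorem gf4_mul_spec : Claim_equal_gf4_mul := by
  intro a b _
  unfold Spec_gf4_mul gf4_mul gf4_mul_alt
  rw [pv_band3_eq_emod a, pv_band3_eq_emod b]
  have ha1 : 0 ≤ a % 4 := Int.emod_nonneg a (by norm_num)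
  have ha2 : a % 4 < 4 := Int.emod_lt_of_pos a (by norm_num)
  have hb1 : 0 ≤ b % 4 := Int.emod_nonneg b (by norm_num)
  have hb2 : b % 4 < 4 := Int.emod_lt_of_pos b (by norm_num)
  interval_cases (a % 4) <;> interval_cases (b % 4) <;> decide
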